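-- pv_equiv track=rewrite | github.com/yym6472/transformers | examples/seq2seq/analysis.py | split_turns
-- ===== SOURCE A (Python) =====
-- def split_turns(source_line):
--     turns = []
--     current_turn_tokens = []
--     for token in source_line.strip().split():
--         current_turn_tokens.append(token)
--         if token == "<eou>":
--             turns.append(current_turn_tokens)
--             current_turn_tokens = []
--     return turns
-- ===== SOURCE B (Python) =====
-- def split_turns(source_line):
--     tokens = source_line.strip().split()
--     ends = [i + 1 for i, t in enumerate(tokens) if t == "<eou>"]
--     starts = [0] + ends[:-1]
--     return [tokens[s:e] for s, e in zip(starts, ends)]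
-- ===== Notes on version B (the rewrite author's own statement) =====
-- stated objective: alternative
-- what changed: B replaces A's running-group accumulator loop with a two-pass boundary table: it first collects the positions just after each '<eou>' token, pairs consecutive boundaries, and slices each turn out of the full token list.
import Mathlib
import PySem

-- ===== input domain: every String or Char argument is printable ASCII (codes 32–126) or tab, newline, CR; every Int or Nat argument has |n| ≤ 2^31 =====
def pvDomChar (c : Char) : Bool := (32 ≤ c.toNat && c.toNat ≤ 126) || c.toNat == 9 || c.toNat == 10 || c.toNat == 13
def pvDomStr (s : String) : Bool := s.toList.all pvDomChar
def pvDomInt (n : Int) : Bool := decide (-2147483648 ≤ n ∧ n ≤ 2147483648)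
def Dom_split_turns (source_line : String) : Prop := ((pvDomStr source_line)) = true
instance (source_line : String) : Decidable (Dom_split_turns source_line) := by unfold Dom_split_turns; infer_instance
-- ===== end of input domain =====

-- B replaces A's running-group accumulator with a two-pass boundary table (collect '<eou>' end
-- positions, pair consecutive boundaries, slice each turn out of the token list); alternative, same cost.

-- ===== PORT A =====
-- one loop step of A: append token to the current turn, flush it on "<eou>"
def pvStepA (st : List (List String) × List String) (token : String) :
    List (List String) × List String :=
  let cur := st.2 ++ [token]
  if token = "<eou>" then (st.1 ++ [cur], []) else (st.1, cur)

def split_turns (source_line : String) : List (List String) :=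
  (((PySem.Str.strip source_line) |> PySem.Str.split₀).foldl pvStepA ([], [])).1

-- ===== PORT B =====
def split_turns_alt (source_line : String) : List (List String) :=
  let tokens := PySem.Str.split₀ (PySem.Str.strip source_line)
  let ends : List Int :=
    ((PySem.List.enumerate tokens 0).filter (fun p => p.2 == "<eou>")).map (fun p => p.1 + 1)
  let starts : List Int := 0 :: PySem.List.slice ends none (some (-1))
  (starts.zip ends).map (fun p => PySem.List.slice tokens (some p.1) (some p.2))

-- ===== PRECONDITION & SPEC =====
def Spec_split_turns (source_line : String) (out : List (List String)) : Prop := out = split_turns_alt source_line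
instance (source_line : String) (out : List (List String)) : Decidable (Spec_split_turns source_line out) := by unfold Spec_split_turns; infer_instance

-- ===== CLAIM (what is proved, stated in full; the proofs are below) =====
def Claim_equal_split_turns : Prop := ∀ (source_line : String), Dom_split_turns source_line → Spec_split_turns source_line (split_turns source_line)

-- ===== LEMMAS AND PROOFS =====

-- reference grouping: turns ending in "<eou>", trailing tokens dropped
def pvGrp : List String → List (List String)
  | [] => []
  | t :: ts =>
    if t = "<eou>" then [t] :: pvGrp ts
    else match pvGrp ts with
      | [] => []
      | g :: gs => (t :: g) :: gs

-- prepend a pending current turn onto the first group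
def pvWithCur (cur : List String) : List (List String) → List (List String)
  | [] => []
  | g :: gs => (cur ++ g) :: gs

lemma pvFoldA (ts : List String) (acc : List (List String)) (cur : List String) :
    (ts.foldl pvStepA (acc, cur)).1 = acc ++ pvWithCur cur (pvGrp ts) := by
  induction ts generalizing acc cur with
  | nil => simp [pvWithCur, pvGrp]
  | cons t ts ih =>
    by_cases h : t = "<eou>"
    · simp [List.foldl_cons, pvStepA, h, ih, pvGrp]
      cases pvGrp ts <;> simp [pvWithCur]
    · simp only [List.foldl_cons, pvStepA, if_neg h, ih, pvGrp]
      cases pvGrp ts <;> simp [pvWithCur]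

-- natural-number end positions of the turns in ts
def pvEnds : List String → List Nat
  | [] => []
  | t :: ts =>
    if t = "<eou>" then 1 :: (pvEnds ts).map (· + 1)
    else (pvEnds ts).map (· + 1)

lemma pvEndsChar (ts : List String) (s : Int) :
    ((PySem.List.enumerate ts s).filter (fun p => p.2 == "<eou>")).map (fun p => p.1 + 1)
      = (pvEnds ts).map (fun k : Nat => s + (k : Int)) := by
  induction ts generalizing s with
  | nil => simp [PySem.List.enumerate_nil, pvEnds]
  | cons t ts ih =>
    rw [PySem.List.enumerate_cons]
    by_cases h : t = "<eou>"
    · rw [List.filter_cons_of_pos (by simpa using h), List.map_cons, ih (s + 1)]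
      simp only [pvEnds, if_pos h, List.map_cons, List.map_map]
      refine congrArg₂ List.cons (by push_cast; ring) (List.map_congr_left fun k _ => ?_)
      simp only [Function.comp_apply]
      push_cast; ring
    · rw [List.filter_cons_of_neg (by simpa using h), ih (s + 1)]
      simp only [pvEnds, if_neg h, List.map_map]
      exact List.map_congr_left fun k _ => by simp only [Function.comp_apply]; push_cast; ring

-- the Nat-level boundary table equals the reference grouping
lemma pvTableGrp (ts : List String) :
    ((List.zip (0 :: (pvEnds ts).dropLast) (pvEnds ts)).map
        (fun p => (ts.drop p.1).take (p.2 - p.1))) = pvGrp ts := by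
  induction ts with
  | nil => simp [pvEnds, pvGrp]
  | cons t ts ih =>
    by_cases h : t = "<eou>"
    · simp only [pvEnds, pvGrp, if_pos h]
      cases hE : pvEnds ts with
      | nil =>
        rw [hE] at ih
        simp at ih
        simp [← ih, h]
      | cons g rest =>
        rw [hE] at ih
        have hd : ((1 : Nat) :: ((g :: rest).map (· + 1))).dropLast
            = ((0 : Nat) :: (g :: rest).dropLast).map (· + 1) := by
          rw [List.dropLast_cons_of_ne_nil (by simp), ← List.map_dropLast]
          simp
        rw [hd, List.zip_cons_cons, List.map_cons, List.zip_map, List.map_map, ← ih]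
        refine congrArg₂ List.cons (by simp) (List.map_congr_left fun p _ => ?_)
        simp [Nat.succ_sub_succ]
    · simp only [pvEnds, pvGrp, if_neg h]
      cases hE : pvEnds ts with
      | nil =>
        rw [hE] at ih
        simp only [List.dropLast_nil, List.zip_nil_right, List.map_nil] at ih
        simp [← ih]
      | cons g rest =>
        rw [hE] at ih
        rw [← List.map_dropLast, List.map_cons, List.zip_cons_cons, List.zip_map,
          List.map_cons, List.map_map, ← ih]
        simp only [List.zip_cons_cons, List.map_cons]
        refine congrArg₂ List.cons ?_ (List.map_congr_left fun p _ => ?_)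
        · simp [List.take_succ_cons]
        · simp [Nat.succ_sub_succ]

lemma pvWithCur_nil (gs : List (List String)) : pvWithCur [] gs = gs := by
  cases gs <;> simp [pvWithCur]

-- ===== VERDICT (by name: the statement is the Claim_ definition above) =====
theorem split_turns_spec : Claim_equal_split_turns := by
  intro s _
  simp only [Spec_split_turns, split_turns, split_turns_alt]
  generalize PySem.Str.split₀ (PySem.Str.strip s) = ts
  rw [pvFoldA ts [] [], List.nil_append, pvWithCur_nil, pvEndsChar ts 0,
    PySem.List.slice_to_neg_one]
  simp only [zero_add]
  rw [← List.map_dropLast]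
  have h0 : (0 : Int) :: ((pvEnds ts).dropLast).map (fun k : Nat => (k : Int))
      = ((0 : Nat) :: (pvEnds ts).dropLast).map (fun k : Nat => (k : Int)) := by simp
  rw [h0, List.zip_map, List.map_map, ← pvTableGrp ts]
  exact (List.map_congr_left fun p _ => by
    simp [Function.comp, PySem.List.slice_natCast]).symm
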